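-- pv_equiv track=rewrite | github.com/foxBMS/foxbms-2 | cli/cmd_etl/batetl/etl/can_filter.py | extend_ids
-- ===== SOURCE A (Python) =====
-- def extend_ids(ids: list[str]) -> list[str]:
--     """Extends the list with CAN ids with
--     respect to the used abbreviations as 201-20F.
--
--     This function only accepts only ids in
--     hexadecimal.
--
--     :param ids: List with CAN ids
--     :return: Extended list with CAN ids
--
--     Note:
--     """
--     copy_ids = ids.copy()
--     for can_id in ids:
--         if "-" in can_id:
--             id_split = can_id.split("-")
--             start = int(id_split[0], 16)
--             end = int(id_split[1], 16)
--             copy_ids.remove(can_id)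
--             for i in range(start, end + 1):
--                 # hex(i)[2:] removes 0x
--                 new_id = hex(i)[2:].upper()
--                 if new_id not in copy_ids:
--                     copy_ids.append(new_id)
--     return copy_ids
-- ===== SOURCE B (Python) =====
-- def extend_ids(ids: list[str]) -> list[str]:
--     """Staged rewrite: keep the non-range ids as the base list, flatten every
--     range into one number stream, then integer-dedup that stream with a set
--     and append the hex of each fresh number not already present in the base."""
--     base = [x for x in ids if "-" not in x]
--     have = set(base)
--     nums = []
--     for rid in ids:
--         if "-" in rid:
--             parts = rid.split("-")
--             nums.extend(range(int(parts[0], 16), int(parts[1], 16) + 1))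
--     out = []
--     seen = set()
--     for n in nums:
--         if n not in seen:
--             seen.add(n)
--             h = hex(n)[2:].upper()
--             if h not in have:
--                 out.append(h)
--     return base + out
-- ===== Notes on version B (the rewrite author's own statement) =====
-- stated objective: alternative
-- what changed: A's single mutate-in-place loop (copy the list, remove each range id from the middle, append expansions while re-scanning the growing list) is replaced by staged passes: filter out the base ids, flatten all ranges into one integer stream, then set-based dedup on the integers plus a set membership test against the base decides which hex strings are appended once at the end.
import Mathlib
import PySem

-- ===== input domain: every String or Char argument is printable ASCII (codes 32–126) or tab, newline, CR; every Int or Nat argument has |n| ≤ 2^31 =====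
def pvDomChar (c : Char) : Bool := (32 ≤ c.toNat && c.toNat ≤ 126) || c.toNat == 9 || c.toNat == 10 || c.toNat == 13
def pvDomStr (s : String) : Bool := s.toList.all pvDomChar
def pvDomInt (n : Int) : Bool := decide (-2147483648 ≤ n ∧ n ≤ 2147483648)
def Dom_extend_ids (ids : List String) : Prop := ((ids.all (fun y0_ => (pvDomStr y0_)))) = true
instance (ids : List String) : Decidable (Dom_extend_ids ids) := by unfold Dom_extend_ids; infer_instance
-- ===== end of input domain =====

-- B replaces A's single mutate-in-place loop (copy, remove range ids, append expansions while
-- re-scanning the list) by staged passes: filter the base ids, flatten all ranges into one integer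
-- stream, then set-based integer dedup plus a base-set membership test decide the appended hex ids.


-- ===== PORT A =====
-- shared builtin helpers (both Pythons use the same builtins int(s,16) and hex(i)[2:].upper())
def hexDigits : List Char := ['0','1','2','3','4','5','6','7','8','9','A','B','C','D','E','F']

def hexDigitU (n : Nat) : Char := hexDigits.getD n '0'

-- uppercase hex digits of n (no '0x' prefix); exact port of hex(n)[2:].upper() for n ≥ 0
def natHexU (n : Nat) : List Char :=
  if _h : n < 16 then [hexDigitU n]
  else natHexU (n / 16) ++ [hexDigitU (n % 16)]
  decreasing_by exact Nat.div_lt_self (by omega) (by omega)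

-- hex(i)[2:].upper(): for i < 0, hex(i) = '-0x…' so [2:] is 'x…', uppercased to 'X…' (unreachable under Pre_)
def hexUpper (i : Int) : String :=
  if i < 0 then String.ofList ('X' :: natHexU (-i).toNat) else String.ofList (natHexU i.toNat)

-- int(s, 16); the .getD 0 branch is unreachable under Pre_ (Python raises ValueError there)
def parseHex (s : String) : Int := (PySem.Int.ofStrBase? s 16).getD 0

def extend_ids (ids : List String) : List String :=
  ids.foldl (fun copy_ids can_id =>
    if PySem.Str.isIn "-" can_id then
      let id_split := (PySem.Str.split? can_id "-").getD []
      let start := parseHex (PySem.List.pyGetD id_split 0 "")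
      let stop := parseHex (PySem.List.pyGetD id_split 1 "")
      -- copy_ids.remove(can_id); can_id is always present, so the getD fallback is unreachable
      let copy_ids := (PySem.List.remove? copy_ids can_id).getD copy_ids
      (PySem.List.pyRange start (stop + 1) 1).foldl (fun cids i =>
        let new_id := hexUpper i
        if cids.contains new_id then cids else cids ++ [new_id]) copy_ids
    else copy_ids) ids

-- ===== PORT B =====
def extend_ids_alt (ids : List String) : List String :=
  let base := ids.filter (fun x => !PySem.Str.isIn "-" x)
  let haveSet : PySem.Set String := PySem.Set.ofList base
  let nums : List Int := ids.foldl (fun nums rid =>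
    if PySem.Str.isIn "-" rid then
      let parts := (PySem.Str.split? rid "-").getD []
      nums ++ PySem.List.pyRange (parseHex (PySem.List.pyGetD parts 0 ""))
               (parseHex (PySem.List.pyGetD parts 1 "") + 1) 1
    else nums) []
  let step : List String × PySem.Set Int → Int → List String × PySem.Set Int := fun st n =>
    if st.2.contains n then st
    else
      let seen := PySem.Set.add st.2 n
      let h := hexUpper n
      if haveSet.contains h then (st.1, seen) else (st.1 ++ [h], seen)
  base ++ (nums.foldl step ([], PySem.Set.empty)).1

-- ===== PRECONDITION & SPEC =====
-- Pre_ excludes exactly the inputs where Python A raises ValueError: a range id whose part before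
-- or after the first '-' is not a valid int(·, 16) literal (e.g. "-", "Z-3", "1--3").
def Pre_extend_ids (ids : List String) : Prop :=
  ∀ s ∈ ids, PySem.Str.isIn "-" s = true →
    (PySem.Int.ofStrBase? (PySem.List.pyGetD ((PySem.Str.split? s "-").getD []) 0 "") 16).isSome = true ∧
    (PySem.Int.ofStrBase? (PySem.List.pyGetD ((PySem.Str.split? s "-").getD []) 1 "") 16).isSome = true
instance (ids : List String) : Decidable (Pre_extend_ids ids) := by unfold Pre_extend_ids; infer_instance

def pvWitness_extend_ids : List String := ["1FF", "201-203", "1FF", "A-C"]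

def Spec_extend_ids (ids : List String) (out : List String) : Prop := out = extend_ids_alt ids
instance (ids : List String) (out : List String) : Decidable (Spec_extend_ids ids out) := by unfold Spec_extend_ids; infer_instance

-- ===== CLAIM (what is proved, stated in full; the proofs are below) =====
def Claim_equal_extend_ids : Prop := ∀ (ids : List String), Dom_extend_ids ids → Pre_extend_ids ids → Spec_extend_ids ids (extend_ids ids)

-- ===== LEMMAS AND PROOFS =====


-- s has no '-' character
def noDash (s : String) : Bool := !PySem.Str.isIn "-" s

-- the expansion numbers a range id produces
def numsOf (c : String) : List Int :=
  let parts := (PySem.Str.split? c "-").getD []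
  PySem.List.pyRange (parseHex (PySem.List.pyGetD parts 0 ""))
    (parseHex (PySem.List.pyGetD parts 1 "") + 1) 1

-- A's inner expansion loop
def expLoop (s : List String) (nums : List Int) : List String :=
  nums.foldl (fun res i =>
    let new_id := hexUpper i
    if res.contains new_id then res else res ++ [new_id]) s

-- A's loop body, named; and the per-range-id string-side step it reduces to
def stepA (copy_ids : List String) (can_id : String) : List String :=
  if PySem.Str.isIn "-" can_id then
    expLoop ((PySem.List.remove? copy_ids can_id).getD copy_ids) (numsOf can_id)
  else copy_ids

def stepB (result : List String) (range_id : String) : List String :=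
  expLoop result (numsOf range_id)

-- B's inner loop body, named (haveSet a parameter)
def stepC (hs : PySem.Set String) (st : List String × PySem.Set Int) (n : Int) :
    List String × PySem.Set Int :=
  if st.2.contains n then st
  else
    let seen := PySem.Set.add st.2 n
    let h := hexUpper n
    if hs.contains h then (st.1, seen) else (st.1 ++ [h], seen)


lemma extend_ids_eq (ids : List String) : extend_ids ids = ids.foldl stepA ids := by
  unfold extend_ids stepA expLoop numsOf; rfl

lemma extend_ids_alt_eq (ids : List String) :
    extend_ids_alt ids =
      (ids.filter noDash) ++
        ((ids.foldl (fun ns rid => if PySem.Str.isIn "-" rid then ns ++ numsOf rid else ns) []).foldl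
          (stepC (PySem.Set.ofList (ids.filter noDash))) ([], PySem.Set.empty)).1 := by
  unfold extend_ids_alt stepC numsOf noDash; rfl

-- ---- hex digits: membership and injectivity ----

lemma hexDigitU_mem (n : Nat) : hexDigitU n ∈ hexDigits := by
  unfold hexDigitU
  rcases Nat.lt_or_ge n 16 with h | h
  · interval_cases n <;> decide
  · rw [List.getD_eq_default] <;> simp_all [hexDigits]

lemma natHexU_subset (n : Nat) : ∀ c ∈ natHexU n, c ∈ hexDigits := by
  induction n using natHexU.induct with
  | case1 n h =>
      rw [natHexU]; simp [h]; exact hexDigitU_mem n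
  | case2 n h ih =>
      rw [natHexU]; simp only [dif_neg h]
      intro c hc
      rcases List.mem_append.mp hc with hm | hm
      · exact ih c hm
      · simp at hm; exact hm ▸ hexDigitU_mem _

def hVal (c : Char) : Nat := hexDigits.idxOf c

def decodeHex (cs : List Char) : Nat := cs.foldl (fun a c => 16 * a + hVal c) 0

lemma hVal_hexDigitU (n : Nat) (h : n < 16) : hVal (hexDigitU n) = n := by
  interval_cases n <;> decide

lemma decodeHex_natHexU (n : Nat) : decodeHex (natHexU n) = n := by
  induction n using natHexU.induct with
  | case1 n h =>
      rw [natHexU]; simp only [dif_pos h]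
      simp [decodeHex, hVal_hexDigitU n h]
  | case2 n h ih =>
      rw [natHexU]; simp only [dif_neg h]
      unfold decodeHex at *
      rw [List.foldl_append, List.foldl_cons, List.foldl_nil, ih,
        hVal_hexDigitU (n % 16) (Nat.mod_lt _ (by omega))]
      omega

lemma natHexU_inj {a b : Nat} (h : natHexU a = natHexU b) : a = b := by
  have := congrArg decodeHex h
  rwa [decodeHex_natHexU, decodeHex_natHexU] at this

lemma X_not_mem_natHexU (n : Nat) : 'X' ∉ natHexU n := by
  intro hm
  have := natHexU_subset n 'X' hm
  simp [hexDigits] at this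

lemma hexUpper_inj {i j : Int} (h : hexUpper i = hexUpper j) : i = j := by
  unfold hexUpper at h
  have h' := congrArg String.toList h
  split_ifs at h' with hi hj hj
  · simp only [String.toList_ofList, List.cons.injEq] at h'
    have := natHexU_inj h'.2
    omega
  · exfalso
    simp only [String.toList_ofList] at h'
    apply X_not_mem_natHexU (j.toNat)
    rw [← h']; simp
  · exfalso
    simp only [String.toList_ofList] at h'
    apply X_not_mem_natHexU (i.toNat)
    rw [h']; simp
  · simp only [String.toList_ofList] at h'
    have := natHexU_inj h'
    omega

lemma noDash_hexUpper (i : Int) : noDash (hexUpper i) = true := by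
  unfold noDash hexUpper
  have key : forall (cs : List Char), (forall c, c ∈ cs → c ∈ 'X' :: hexDigits) →
      PySem.Str.isIn "-" (String.ofList cs) = false := by
    intro cs hsub
    refine Bool.eq_false_iff.mpr fun htrue => ?_
    have hinf := (PySem.Str.isIn_iff_infix _ _).mp htrue
    simp only [String.toList_ofList] at hinf
    have hm := hinf.subset (show '-' ∈ ("-" : String).toList by decide)
    have := hsub '-' hm
    simp [hexDigits] at this
  split
  · simp only [Bool.not_eq_true']
    apply key
    intro c hc
    rcases List.mem_cons.mp hc with e | hc
    · simp [e]
    · exact List.mem_cons_of_mem _ (natHexU_subset _ c hc)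
  · simp only [Bool.not_eq_true']
    apply key
    intro c hc
    exact List.mem_cons_of_mem _ (natHexU_subset _ c hc)

-- ---- stage 1: A's fold equals the two-pass fold of stepB ----

lemma remove_skip (pre xs : List String) (c : String)
    (hpre : forall s, s ∈ pre → noDash s = true) (hc : noDash c = false) :
    PySem.List.remove? (pre ++ c :: xs) c = some (pre ++ xs) := by
  induction pre with
  | nil => simp
  | cons p pre ih =>
      have hne : p ≠ c := by
        intro e; have := hpre p (by simp); rw [e, hc] at this; cases this
      simp only [List.cons_append]
      rw [PySem.List.remove?_cons_of_ne _ hne, ih (fun s hs => hpre s (by simp [hs]))]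
      rfl

lemma expLoop_delta (nums : List Int) : forall (l1 l2 : List String),
    (forall x : String, noDash x = true → (x ∈ l1 ↔ x ∈ l2)) →
    ∃ d : List String, (forall x, x ∈ d → noDash x = true) ∧
      expLoop l1 nums = l1 ++ d ∧ expLoop l2 nums = l2 ++ d := by
  induction nums with
  | nil => exact fun l1 l2 _ => ⟨[], by simp, by simp [expLoop], by simp [expLoop]⟩
  | cons i nums ih =>
      intro l1 l2 hequiv
      have hnd := noDash_hexUpper i
      have hmem : (hexUpper i ∈ l1) ↔ (hexUpper i ∈ l2) := hequiv _ hnd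
      by_cases hin : hexUpper i ∈ l1
      · have hin2 : hexUpper i ∈ l2 := hmem.mp hin
        obtain ⟨d, hd, h1, h2⟩ := ih l1 l2 hequiv
        exact ⟨d, hd, by simpa [expLoop, hin] using h1, by simpa [expLoop, hin2] using h2⟩
      · have hin2 : hexUpper i ∉ l2 := fun h => hin (hmem.mpr h)
        obtain ⟨d, hd, h1, h2⟩ := ih (l1 ++ [hexUpper i]) (l2 ++ [hexUpper i])
          (by intro x hx; simp [hequiv x hx])
        refine ⟨hexUpper i :: d, ?_, ?_, ?_⟩
        · intro x hx; rcases List.mem_cons.mp hx with e | hx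
          · exact e ▸ hnd
          · exact hd x hx
        · simpa [expLoop, hin] using h1
        · simpa [expLoop, hin2] using h2

lemma main_sim : forall (rest pre acc : List String),
    (forall s, s ∈ pre → noDash s = true) → (forall s, s ∈ acc → noDash s = true) →
    rest.foldl stepA (pre ++ rest ++ acc)
      = (rest.filter (fun s => !noDash s)).foldl stepB (pre ++ rest.filter noDash ++ acc) := by
  intro rest
  induction rest with
  | nil => intro pre acc _ _; simp
  | cons c rest ih =>
      intro pre acc hpre hacc
      by_cases hc : noDash c = true
      · have hiso : PySem.Str.isIn "-" c = false := by
          simpa [noDash] using hc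
        have hstep : stepA (pre ++ (c :: rest) ++ acc) c = pre ++ (c :: rest) ++ acc := by
          unfold stepA; rw [if_neg]; simpa using hiso
        have hre : pre ++ (c :: rest) ++ acc = (pre ++ [c]) ++ rest ++ acc := by simp
        rw [List.foldl_cons, hstep, hre,
          ih (pre ++ [c]) acc (by intro s hs; rcases List.mem_append.mp hs with h | h
                                  · exact hpre s h
                                  · simp at h; exact h ▸ hc) hacc]
        simp [hc]
      · have hcf : noDash c = false := by simpa using hc
        have hiso : PySem.Str.isIn "-" c = true := by
          simpa [noDash] using hcf
        have hrem : (PySem.List.remove? (pre ++ (c :: rest) ++ acc) c).getD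
            (pre ++ (c :: rest) ++ acc) = pre ++ (rest ++ acc) := by
          have : pre ++ (c :: rest) ++ acc = pre ++ c :: (rest ++ acc) := by simp
          rw [this, remove_skip pre (rest ++ acc) c hpre hcf]; rfl
        have hequiv : forall x : String, noDash x = true →
            (x ∈ pre ++ (rest ++ acc) ↔ x ∈ pre ++ rest.filter noDash ++ acc) := by
          intro x hx
          simp only [List.mem_append, List.mem_filter]
          tauto
        obtain ⟨d, hd, h1, h2⟩ := expLoop_delta (numsOf c) _ _ hequiv
        have hstep : stepA (pre ++ (c :: rest) ++ acc) c = pre ++ rest ++ (acc ++ d) := by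
          unfold stepA; rw [if_pos hiso, hrem, h1]; simp
        have haccd : forall s, s ∈ acc ++ d → noDash s = true := by
          intro s hs; rcases List.mem_append.mp hs with h | h
          · exact hacc s h
          · exact hd s h
        rw [List.foldl_cons, hstep, ih pre (acc ++ d) hpre haccd]
        have hfilt : (c :: rest).filter (fun s => !noDash s)
            = c :: rest.filter (fun s => !noDash s) := by simp [hcf]
        have hfilt2 : (c :: rest).filter noDash = rest.filter noDash := by simp [hcf]
        rw [hfilt, hfilt2, List.foldl_cons]
        have hstepB : stepB (pre ++ rest.filter noDash ++ acc) c
            = pre ++ rest.filter noDash ++ (acc ++ d) := by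
          simp only [stepB, h2]; simp
        rw [hstepB]

-- ---- stage 2: the stepB fold is one expLoop over the flattened number stream ----

lemma expLoop_append (s : List String) (n1 n2 : List Int) :
    expLoop s (n1 ++ n2) = expLoop (expLoop s n1) n2 := by
  unfold expLoop; rw [List.foldl_append]

lemma foldl_stepB_flat (rids : List String) : forall (s : List String),
    rids.foldl stepB s = expLoop s (rids.flatMap numsOf) := by
  induction rids with
  | nil => intro s; simp [expLoop]
  | cons r rids ih =>
      intro s
      rw [List.foldl_cons, ih, List.flatMap_cons, expLoop_append]
      rfl

-- ---- stage 3: B's number fold computes the same appended suffix ----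

lemma nums_fold_flat (ids : List String) : forall (acc : List Int),
    ids.foldl (fun ns rid => if PySem.Str.isIn "-" rid then ns ++ numsOf rid else ns) acc
      = acc ++ (ids.filter (fun s => !noDash s)).flatMap numsOf := by
  induction ids with
  | nil => intro acc; simp
  | cons c ids ih =>
      intro acc
      by_cases hc : PySem.Str.isIn "-" c = true
      · simp only [List.foldl_cons, ih,
          List.filter_cons, noDash, hc, Bool.not_not]
        simp
      · have hcf : PySem.Str.isIn "-" c = false := by simpa using hc
        simp only [List.foldl_cons, ih,
          List.filter_cons, noDash, hcf, Bool.not_false]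
        simp

lemma contains_ofList (base : List String) (h : String) :
    (PySem.Set.ofList base).contains h = true ↔ h ∈ base := by
  rw [PySem.Set.contains_iff, PySem.Set.mem_ofList]

lemma simC (base : List String) : forall (nums : List Int) (cur out : List String) (seen : PySem.Set Int),
    (forall i : Int, hexUpper i ∈ cur ↔ (seen.contains i = true ∨ hexUpper i ∈ base)) →
    ∃ d, expLoop cur nums = cur ++ d ∧
      (nums.foldl (stepC (PySem.Set.ofList base)) (out, seen)).1 = out ++ d := by
  intro nums
  induction nums with
  | nil => intro cur out seen _; exact ⟨[], by simp [expLoop], by simp⟩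
  | cons n nums ih =>
      intro cur out seen hinv
      by_cases hc : hexUpper n ∈ cur
      · have hcase := (hinv n).mp hc
        have hexp : expLoop cur (n :: nums) = expLoop cur nums := by
          unfold expLoop
          rw [List.foldl_cons]
          simp only [List.contains_iff_mem]
          rw [if_pos (by simpa using hc)]
        by_cases hseen : seen.contains n = true
        · have hstep : stepC (PySem.Set.ofList base) (out, seen) n = (out, seen) := by
            unfold stepC; rw [if_pos hseen]
          obtain ⟨d, h1, h2⟩ := ih cur out seen hinv
          exact ⟨d, by rw [hexp, h1], by rw [List.foldl_cons, hstep, h2]⟩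
        · have hbase : hexUpper n ∈ base := by tauto
          have hstep : stepC (PySem.Set.ofList base) (out, seen) n
              = (out, PySem.Set.add seen n) := by
            unfold stepC
            rw [if_neg hseen, if_pos ((contains_ofList base _).mpr hbase)]
          have hinv' : forall i : Int, hexUpper i ∈ cur ↔
              ((PySem.Set.add seen n).contains i = true ∨ hexUpper i ∈ base) := by
            intro i
            rw [PySem.Set.contains_iff, PySem.Set.mem_add]
            constructor
            · intro h
              rcases (hinv i).mp h with h' | h'
              · exact Or.inl (Or.inl (by rwa [← PySem.Set.contains_iff]))
              · exact Or.inr h'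
            · rintro ((h' | rfl) | h')
              · exact (hinv i).mpr (Or.inl (by rwa [PySem.Set.contains_iff]))
              · exact hc
              · exact (hinv i).mpr (Or.inr h')
          obtain ⟨d, h1, h2⟩ := ih cur out (PySem.Set.add seen n) hinv'
          exact ⟨d, by rw [hexp, h1], by rw [List.foldl_cons, hstep, h2]⟩
      · have hns : n ∉ seen :=
          fun hm => hc ((hinv n).mpr (Or.inl ((PySem.Set.contains_iff _ _).mpr hm)))
        have hnb : hexUpper n ∉ base := fun h => hc ((hinv n).mpr (Or.inr h))
        have hexp : expLoop cur (n :: nums) = expLoop (cur ++ [hexUpper n]) nums := by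
          unfold expLoop
          rw [List.foldl_cons]
          simp only [List.contains_iff_mem]
          rw [if_neg (by simpa using hc)]
        have hstep : stepC (PySem.Set.ofList base) (out, seen) n
            = (out ++ [hexUpper n], PySem.Set.add seen n) := by
          unfold stepC
          rw [if_neg (by simpa [PySem.Set.contains_iff] using hns),
            if_neg (by rw [Bool.not_eq_true, ← Bool.not_eq_true, contains_ofList]; exact hnb)]
        have hinv' : forall i : Int, hexUpper i ∈ cur ++ [hexUpper n] ↔
            ((PySem.Set.add seen n).contains i = true ∨ hexUpper i ∈ base) := by
          intro i
          rw [PySem.Set.contains_iff, PySem.Set.mem_add]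
          simp only [List.mem_append, List.mem_singleton]
          constructor
          · rintro (h | h)
            · rcases (hinv i).mp h with h' | h'
              · exact Or.inl (Or.inl (by rwa [← PySem.Set.contains_iff]))
              · exact Or.inr h'
            · exact Or.inl (Or.inr (hexUpper_inj h))
          · rintro ((h' | rfl) | h')
            · exact Or.inl ((hinv i).mpr (Or.inl (by rwa [PySem.Set.contains_iff])))
            · exact Or.inr rfl
            · exact Or.inl ((hinv i).mpr (Or.inr h'))
        obtain ⟨d, h1, h2⟩ := ih (cur ++ [hexUpper n]) (out ++ [hexUpper n]) (PySem.Set.add seen n) hinv'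
        refine ⟨hexUpper n :: d, ?_, ?_⟩
        · rw [hexp, h1]; simp
        · rw [List.foldl_cons, hstep, h2]; simp

-- ===== VERDICT (by name: the statement is the Claim_ definition above) =====
theorem extend_ids_spec : Claim_equal_extend_ids := by
  intro ids _ _
  unfold Spec_extend_ids
  rw [extend_ids_eq, extend_ids_alt_eq]
  have h1 := main_sim ids [] [] (by simp) (by simp)
  simp only [List.nil_append, List.append_nil] at h1
  rw [h1, foldl_stepB_flat, nums_fold_flat, List.nil_append]
  obtain ⟨d, hA, hB⟩ := simC (ids.filter noDash)
    ((ids.filter (fun s => !noDash s)).flatMap numsOf) (ids.filter noDash) [] PySem.Set.empty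
    (by intro i; simp [PySem.Set.empty])
  rw [hA, hB, List.nil_append]
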